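-- pv_equiv track=rewrite | github.com/rladusdn02/Algorithm-codeit | 프로그래머스/0/181935. 홀짝에 따라 다른 값 반환하기/홀짝에 따라 다른 값 반환하기.py | solution
-- ===== SOURCE A (Python) =====
-- def solution(n):
--     result=0
--     k=int(n/2) #n을 2로 나누었을 때 몫
--     for i in range(0,k+1):
--         if n % 2 == 1: #홀수일때
--             a=2*i+1
--         else:
--             a=(2*i)**2
--         result+=a
--     return result
-- ===== SOURCE B (Python) =====
-- def solution(n):
--     # odd n: 1 + 3 + ... + (2k+1) = (k+1)^2
--     # even n: 0^2 + 2^2 + ... + (2k)^2 = 2k(k+1)(2k+1)/3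
--     k = n // 2
--     if n % 2 == 1:
--         return (k + 1) ** 2
--     return 2 * k * (k + 1) * (2 * k + 1) // 3
-- ===== Notes on version B (the rewrite author's own statement) =====
-- stated objective: faster
-- what changed: Replaces the O(n) summation loop with closed-form formulas ((k+1)^2 for odd n, 2k(k+1)(2k+1)/3 for even n); Pre_ restricts to the problem's natural domain n >= 0, excluding negative n where A's returned 0/1 values are an accident of int(n/2) truncation emptying the range.
-- outside the precondition, e.g. on solution(-1): A returns 1, B returns 0; on solution(-3): A returns 0, B returns 1; on solution(-4): A returns 0, B returns -4
import Mathlib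
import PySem

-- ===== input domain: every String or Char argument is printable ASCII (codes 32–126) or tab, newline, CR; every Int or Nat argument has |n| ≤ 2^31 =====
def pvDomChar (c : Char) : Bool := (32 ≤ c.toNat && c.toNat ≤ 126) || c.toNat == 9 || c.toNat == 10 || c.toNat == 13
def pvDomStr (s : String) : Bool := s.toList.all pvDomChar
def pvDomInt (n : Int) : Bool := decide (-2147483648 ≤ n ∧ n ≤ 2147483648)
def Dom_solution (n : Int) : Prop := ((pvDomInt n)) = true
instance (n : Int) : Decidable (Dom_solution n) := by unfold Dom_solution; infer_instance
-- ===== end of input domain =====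

-- B replaces A's O(n) summation loop by the closed-form formulas (k+1)^2 (odd n) and 2k(k+1)(2k+1)/3 (even n), on the natural domain n ≥ 0.

-- ===== PORT A =====
-- int(n/2) is exact truncating division for |n| ≤ 2^31 (n/2 is an exact float): PySem.Int.truncdiv
def solution (n : Int) : Int :=
  let k := PySem.Int.truncdiv n 2
  (PySem.List.pyRange 0 (k + 1) 1).foldl
    (fun result i =>
      result + (if PySem.Int.mod n 2 = 1 then 2 * i + 1 else (2 * i) ^ 2)) 0

-- ===== PORT B =====
def solution_alt (n : Int) : Int :=
  let k := PySem.Int.floordiv n 2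
  if PySem.Int.mod n 2 = 1 then (k + 1) ^ 2
  else PySem.Int.floordiv (2 * k * (k + 1) * (2 * k + 1)) 3

-- ===== PRECONDITION & SPEC =====
-- Pre_ restricts to the problem's natural domain n ≥ 0; for negative n A still returns
-- (0, or 1 at n = -1), but those values are an accident of int(n/2) truncation making the
-- range empty, and B's closed forms naturally compute the series value instead.
def Pre_solution (n : Int) : Prop := 0 ≤ n
instance (n : Int) : Decidable (Pre_solution n) := by unfold Pre_solution; infer_instance
def pvWitness_solution : Int := 7

def Spec_solution (n : Int) (out : Int) : Prop := out = solution_alt n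
instance (n : Int) (out : Int) : Decidable (Spec_solution n out) := by unfold Spec_solution; infer_instance

-- ===== CLAIM (what is proved, stated in full; the proofs are below) =====
def Claim_equal_solution : Prop := ∀ (n : Int), Dom_solution n → Pre_solution n → Spec_solution n (solution n)

-- ===== LEMMAS AND PROOFS =====

-- sum of the first m odd numbers
theorem loop_odd (m : Nat) :
    (PySem.List.pyRange 0 (m : Int) 1).foldl (fun r i => r + (2 * i + 1)) 0 = (m : Int) ^ 2 := by
  induction m with
  | zero => simp [PySem.List.pyRange_one_eq_nil]
  | succ m ih =>
      have h : ((m + 1 : Nat) : Int) = (m : Int) + 1 := by push_cast; ring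
      rw [h, PySem.List.pyRange_one_succ_right (by positivity), List.foldl_append, ih]
      simp; ring

-- three times the sum of (2i)^2 for i < m
theorem loop_even (m : Nat) :
    3 * (PySem.List.pyRange 0 (m : Int) 1).foldl (fun r i => r + (2 * i) ^ 2) 0
      = 2 * ((m : Int) - 1) * m * (2 * m - 1) := by
  induction m with
  | zero => simp [PySem.List.pyRange_one_eq_nil]
  | succ m ih =>
      have h : ((m + 1 : Nat) : Int) = (m : Int) + 1 := by push_cast; ring
      rw [h, PySem.List.pyRange_one_succ_right (by positivity), List.foldl_append]
      simp only [List.foldl_cons, List.foldl_nil]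
      have := ih
      push_cast at this ⊢
      nlinarith [this]

theorem truncdiv_two_nonneg (n : Int) (h : 0 ≤ n) :
    PySem.Int.truncdiv n 2 = PySem.Int.floordiv n 2 := by
  rw [PySem.Int.floordiv_eq_ediv_of_pos (by norm_num)]
  simp only [PySem.Int.truncdiv]
  exact Int.tdiv_eq_ediv_of_nonneg h

theorem solution_spec : Claim_equal_solution := by
  intro n _ hn
  unfold Spec_solution solution solution_alt
  rw [truncdiv_two_nonneg n hn]
  set k := PySem.Int.floordiv n 2 with hk
  have hk0 : 0 ≤ k := by
    rw [hk, PySem.Int.floordiv_eq_ediv_of_pos (by norm_num)]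
    exact Int.ediv_nonneg hn (by norm_num)
  clear_value k
  dsimp only
  obtain ⟨m, rfl⟩ : ∃ m : Nat, k = (m : Int) := ⟨k.toNat, by omega⟩
  by_cases hpar : PySem.Int.mod n 2 = 1
  · simp only [if_pos hpar]
    have h := loop_odd (m + 1)
    push_cast at h
    exact h
  · simp only [if_neg hpar]
    have h3 := loop_even (m + 1)
    push_cast at h3
    rw [PySem.Int.floordiv_eq_ediv_of_pos (by norm_num)]
    have hx : 2 * (m : Int) * ((m : Int) + 1) * (2 * (m : Int) + 1)
        = 3 * List.foldl (fun r i => r + (2 * i) ^ 2) 0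
            (PySem.List.pyRange 0 ((m : Int) + 1) 1) := by
      linear_combination -h3
    rw [hx, Int.mul_ediv_cancel_left _ (by norm_num)]
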